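-- pv_equiv track=rewrite | github.com/softkleenex/workspace | studying_25.02.13~/6884.py | shortest_primed_subsequence
-- ===== SOURCE A (Python) =====
-- import math
--
-- def is_prime(s):#s가 소수인지 판별해야 한다 s가 2 ~ s의 제곱근 까지의 것과 나눠지지 않으면 소수임, s는 최솟값 2
--     if s < 2:
--         return False
--     if s in (2, 3):
--         return True
--     if s % 2 == 0 or s % 3 == 0:
--         return False
--     if all  (s % i3 != 0  for i3 in range(5, int(math.sqrt(s) + 1), 2   )  ):
--         return True
--
--     return False
--
-- def shortest_primed_subsequence(lst):
--     n = len(lst)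
--     prefix_sum = [0] * (n + 1)
--     for i in range(0, n):
--         prefix_sum[i + 1] = prefix_sum[i] + lst[i]#perfix_sum i > lst 0 ~ i-1 까지의 총합
--
--     for length in range(2, n+1):
--         #lst를 이용해 길이가 lenght 인 것들을 만들자!
--         for start in range(n -length + 1):
--             #시작점 지정, 0 ~ lenght -1  > n - lenght ~ n - length + length = n
--             end = start + length#끝점을 지정하는데, 끝점의 직전까지가 방문할 인덱스이다
--             sub_sum = prefix_sum[end] - prefix_sum[start]
--             #end의 이전까지가 방문할 인덱스고, perfix[x]는 x직전값까지의 누적합을 다루기에, perfix_sum[end]가 유효하다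
--             if is_prime(sub_sum):
--                 return length, lst[start:end]
--
--     return None
-- ===== SOURCE B (Python) =====
-- import math
--
-- def is_prime(s):
--     if s < 2:
--         return False
--     if s in (2, 3):
--         return True
--     if s % 2 == 0 or s % 3 == 0:
--         return False
--     if all(s % i3 != 0 for i3 in range(5, int(math.sqrt(s) + 1), 2)):
--         return True
--     return False
--
-- def shortest_primed_subsequence(lst):
--     # Exhaustive sweep keeping the lexicographically smallest (length, start)
--     # candidate, instead of A's length-major early-return scan.
--     n = len(lst)
--     prefix = [0]
--     total = 0
--     for x in lst:
--         total += x
--         prefix.append(total)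
--     best = None  # (length, start)
--     for start in range(n):
--         for end in range(start + 2, n + 1):
--             if is_prime(prefix[end] - prefix[start]):
--                 cand = (end - start, start)
--                 if best is None or cand[0] < best[0] or (cand[0] == best[0] and cand[1] < best[1]):
--                     best = cand
--                 break  # longer ends at this start can only be worse
--     if best is None:
--         return None
--     length, start = best
--     return length, lst[start:start + length]
-- ===== Notes on version B (the rewrite author's own statement) =====
-- stated objective: alternative
-- what changed: Replaces A's length-major nested scan with early return by a start-major exhaustive sweep that, for each start, finds the first prime end (breaking early) and keeps the lexicographically smallest (length, start) candidate.
import Mathlib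
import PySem

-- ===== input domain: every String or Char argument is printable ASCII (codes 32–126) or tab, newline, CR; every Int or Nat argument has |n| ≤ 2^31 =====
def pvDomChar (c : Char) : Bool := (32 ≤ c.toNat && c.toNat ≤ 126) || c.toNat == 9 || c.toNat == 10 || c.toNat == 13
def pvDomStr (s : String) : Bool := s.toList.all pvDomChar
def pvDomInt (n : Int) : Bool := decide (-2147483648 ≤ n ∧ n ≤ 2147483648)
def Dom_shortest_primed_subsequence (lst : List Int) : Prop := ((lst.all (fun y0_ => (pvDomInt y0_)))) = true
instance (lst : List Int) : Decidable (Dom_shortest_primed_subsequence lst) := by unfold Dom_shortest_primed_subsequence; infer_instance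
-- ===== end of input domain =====

-- B replaces A's length-major early-return scan by a start-major exhaustive sweep that keeps
-- the lexicographically smallest (length, start) candidate; objective: alternative (same cost).

-- ===== PORT A =====
-- shared helper is_prime; Python's 'int(math.sqrt(s) + 1)' is ported as 'Nat.sqrt s.toNat + 1':
-- the float bound can exceed the integer one by 1, but any extra odd divisor d checked then
-- satisfies d > sqrt(s), so d ∣ s would force the smaller odd cofactor s/d ≥ 5 to be checked
-- and fail first — the Boolean result of the 'all' (and hence of is_prime) is exact.
def is_prime (s : Int) : Bool :=
  if s < 2 then false
  else if s == 2 || s == 3 then true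
  else if PySem.Int.mod s 2 == 0 || PySem.Int.mod s 3 == 0 then false
  else if (PySem.List.pyRange 5 ((Nat.sqrt s.toNat : Int) + 1) 2).all
            (fun i3 => PySem.Int.mod s i3 != 0) then true
  else false

def shortest_primed_subsequence (lst : List Int) : Option (Int × List Int) :=
  let n : Int := lst.length
  let prefixSum : List Int :=
    (PySem.List.pyRange 0 n 1).foldl
      (fun ps i => ps.set (i + 1).toNat (PySem.List.pyGetD ps i 0 + PySem.List.pyGetD lst i 0))
      (List.replicate (n.toNat + 1) 0)
  (PySem.List.pyRange 2 (n + 1) 1).findSome? (fun length =>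
    (PySem.List.pyRange 0 (n - length + 1) 1).findSome? (fun start =>
      let e := start + length
      let subSum := PySem.List.pyGetD prefixSum e 0 - PySem.List.pyGetD prefixSum start 0
      if is_prime subSum then some (length, PySem.List.slice lst (some start) (some e)) else none))

-- ===== PORT B =====
def shortest_primed_subsequence_alt (lst : List Int) : Option (Int × List Int) :=
  let n : Int := lst.length
  let pfx : List Int :=
    (lst.foldl (fun tp x => (tp.1 + x, tp.2 ++ [tp.1 + x])) ((0 : Int), [(0 : Int)])).2
  let best : Option (Int × Int) :=
    (PySem.List.pyRange 0 n 1).foldl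
      (fun best start =>
        match (PySem.List.pyRange (start + 2) (n + 1) 1).find?
                (fun e => is_prime (PySem.List.pyGetD pfx e 0 - PySem.List.pyGetD pfx start 0)) with
        | none => best
        | some e =>
          match best with
          | none => some (e - start, start)
          | some b =>
            if e - start < b.1 || (e - start == b.1 && start < b.2) then some (e - start, start)
            else best)
      none
  match best with
  | none => none
  | some (length, start) => some (length, PySem.List.slice lst (some start) (some (start + length)))

-- ===== PRECONDITION & SPEC =====
def Spec_shortest_primed_subsequence (lst : List Int) (out : Option (Int × List Int)) : Prop := out = shortest_primed_subsequence_alt lst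
instance (lst : List Int) (out : Option (Int × List Int)) : Decidable (Spec_shortest_primed_subsequence lst out) := by unfold Spec_shortest_primed_subsequence; infer_instance

-- ===== CLAIM (what is proved, stated in full; the proofs are below) =====
def Claim_equal_shortest_primed_subsequence : Prop := ∀ (lst : List Int), Dom_shortest_primed_subsequence lst → Spec_shortest_primed_subsequence lst (shortest_primed_subsequence lst)

-- ===== LEMMAS AND PROOFS =====

-- canonical prefix sums
def pvPs (lst : List Int) (k : Nat) : Int := (lst.take k).sum
def pvP (lst : List Int) : List Int := (List.range (lst.length + 1)).map (fun k => pvPs lst k)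
-- the shared primality test on the canonical prefix sums: pvQe lst s e decides whether lst[s:e] has prime sum
def pvQe (lst : List Int) (s e : Int) : Bool := is_prime (pvPs lst e.toNat - pvPs lst s.toNat)
-- a valid prime-sum candidate (length, start)
def pvGood (lst : List Int) (c : Int × Int) : Prop :=
  2 ≤ c.1 ∧ 0 ≤ c.2 ∧ c.2 + c.1 ≤ (lst.length : Int) ∧ pvQe lst c.2 (c.2 + c.1) = true
def pvLt (a b : Int × Int) : Prop := a.1 < b.1 ∨ (a.1 = b.1 ∧ a.2 < b.2)
def pvLe (a b : Int × Int) : Prop := a.1 < b.1 ∨ (a.1 = b.1 ∧ a.2 ≤ b.2)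

-- A's candidate order and search, on the canonical prefix sums
def pvPairs (lst : List Int) : List (Int × Int) :=
  (PySem.List.pyRange 2 ((lst.length : Int) + 1) 1).flatMap
    (fun l => (PySem.List.pyRange 0 ((lst.length : Int) - l + 1) 1).map (fun s => ((l, s) : Int × Int)))
def pvSearchA (lst : List Int) : Option (Int × Int) :=
  (pvPairs lst).find? (fun c => pvQe lst c.2 (c.2 + c.1))

-- B's per-start step and sweep, on the canonical prefix sums
def pvStep (lst : List Int) (best : Option (Int × Int)) (start : Int) : Option (Int × Int) :=
  match (PySem.List.pyRange (start + 2) ((lst.length : Int) + 1) 1).find? (fun e => pvQe lst start e) with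
  | none => best
  | some e =>
    match best with
    | none => some (e - start, start)
    | some b =>
      if e - start < b.1 || (e - start == b.1 && start < b.2) then some (e - start, start) else best
def pvBestB (lst : List Int) : Option (Int × Int) :=
  (PySem.List.pyRange 0 ((lst.length : Int)) 1).foldl (pvStep lst) none

def pvRender (lst : List Int) (c : Int × Int) : Int × List Int :=
  (c.1, PySem.List.slice lst (some c.2) (some (c.2 + c.1)))

-- generic list lemmas (searched for in Mathlib/PySem, not found there)
theorem pv_findSome?_congr {α β : Type} {l : List α} {f g : α → Option β}
    (h : ∀ x ∈ l, f x = g x) : l.findSome? f = l.findSome? g := by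
  induction l with
  | nil => rfl
  | cons x t ih =>
    simp only [List.findSome?_cons, h x (List.mem_cons_self), ih (fun y hy => h y (List.mem_cons_of_mem _ hy))]

theorem pv_find?_congr {α : Type} {l : List α} {p q : α → Bool}
    (h : ∀ x ∈ l, p x = q x) : l.find? p = l.find? q := by
  induction l with
  | nil => rfl
  | cons x t ih =>
    simp only [List.find?_cons, h x (List.mem_cons_self), ih (fun y hy => h y (List.mem_cons_of_mem _ hy))]

theorem pv_findSome?_guard_map {α β : Type} (l : List α) (p : α → Bool) (h : α → β) :
    l.findSome? (fun x => if p x then some (h x) else none) = (l.find? p).map h := by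
  induction l with
  | nil => rfl
  | cons x t ih =>
    simp only [List.findSome?_cons, List.find?_cons]
    by_cases hp : p x = true
    · simp [hp]
    · simp only [Bool.not_eq_true] at hp; simp [hp, ih]

theorem pv_findSome?_flatMap {α β γ : Type} (l : List α) (g : α → List β) (f : β → Option γ) :
    (l.flatMap g).findSome? f = l.findSome? (fun a => (g a).findSome? f) := by
  induction l with
  | nil => rfl
  | cons x t ih =>
    simp only [List.flatMap_cons, List.findSome?_append, List.findSome?_cons]
    cases h : (g x).findSome? f <;> simp [h, ih]

theorem pv_find?_min {α : Type} {R : α → α → Prop} {l : List α} {p : α → Bool} {a : α}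
    (hp : l.Pairwise R) (hf : l.find? p = some a) :
    ∀ b ∈ l, p b = true → a = b ∨ R a b := by
  induction l with
  | nil => simp at hf
  | cons x t ih =>
    rw [List.pairwise_cons] at hp
    rw [List.find?_cons] at hf
    by_cases hx : p x = true
    · simp only [hx] at hf
      intro b hb hpb
      rcases List.mem_cons.mp hb with rfl | hb
      · left; simpa using hf.symm
      · right; obtain rfl : x = a := by simpa using hf
        exact hp.1 b hb
    · simp only [Bool.not_eq_true] at hx
      simp only [hx] at hf
      intro b hb hpb
      rcases List.mem_cons.mp hb with rfl | hb
      · rw [hx] at hpb; simp at hpb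
      · exact ih hp.2 hf b hb hpb

-- the canonical prefix list read at an in-range Int index
theorem pvP_getD (lst : List Int) (i : Int) (h0 : 0 ≤ i) (h1 : i ≤ (lst.length : Int)) :
    PySem.List.pyGetD (pvP lst) i 0 = pvPs lst i.toNat := by
  have hi : i.toNat < lst.length + 1 := by omega
  rw [PySem.List.pyGetD_eq_getElem (h0 := h0) (h1 := by simp [pvP]; omega)]
  simp [pvP, hi]

-- A's fill loop produces the canonical prefix list
theorem pv_prefixA_fill (lst : List Int) : ∀ m : Nat, m ≤ lst.length →
    (PySem.List.pyRange 0 (m : Int) 1).foldl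
      (fun ps i => ps.set (i + 1).toNat (PySem.List.pyGetD ps i 0 + PySem.List.pyGetD lst i 0))
      (List.replicate (lst.length + 1) 0)
    = (List.range (m + 1)).map (fun k => pvPs lst k) ++ List.replicate (lst.length - m) 0 := by
  intro m
  induction m with
  | zero =>
    intro _
    simp [PySem.List.pyRange_zero_nat, pvPs, List.replicate_succ]
  | succ m ih =>
    intro hm
    have hm' : m ≤ lst.length := by omega
    have hcast : ((m + 1 : Nat) : Int) = (m : Int) + 1 := by push_cast; ring
    rw [hcast, PySem.List.pyRange_one_succ_right (by positivity), List.foldl_append, ih hm']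
    set L := (List.range (m + 1)).map (fun k => pvPs lst k) ++ List.replicate (lst.length - m) 0 with hL
    have hlen1 : ((List.range (m + 1)).map (fun k => pvPs lst k)).length = m + 1 := by simp
    have hLlen : L.length = lst.length + 1 := by simp [hL]; omega
    simp only [List.foldl_cons, List.foldl_nil]
    have hget1 : PySem.List.pyGetD L (m : Int) 0 = pvPs lst m := by
      rw [PySem.List.pyGetD_eq_getElem (h0 := by positivity) (h1 := by rw [hLlen]; push_cast; omega)]
      have htm : ((m : Int)).toNat = m := by omega
      have key : ∀ (hh : m < L.length), L[m]'hh = pvPs lst m := by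
        intro hh
        simp only [hL] at hh ⊢
        rw [List.getElem_append_left (by simp)]
        simp
      simp only [htm]
      exact key _
    have hget2 : PySem.List.pyGetD lst (m : Int) 0 = lst[m]'(by omega) := by
      rw [PySem.List.pyGetD_eq_getElem (h0 := by positivity) (h1 := by push_cast; omega)]
      simp
    have htn : ((m : Int) + 1).toNat = m + 1 := by omega
    rw [hget1, hget2, htn, hL, List.set_append]
    rw [if_neg (by simp)]
    have hrep : List.replicate (lst.length - m) (0 : Int) = 0 :: List.replicate (lst.length - (m + 1)) 0 := by
      have : lst.length - m = (lst.length - (m + 1)) + 1 := by omega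
      rw [this, List.replicate_succ]
    rw [hrep]
    have hidx : m + 1 - ((List.range (m + 1)).map (fun k => pvPs lst k)).length = 0 := by
      rw [hlen1]; omega
    rw [hidx, List.set_cons_zero]
    have hsum : pvPs lst m + lst[m]'(by omega) = pvPs lst (m + 1) := by
      simp [pvPs, List.sum_take_succ lst m (by omega)]
    rw [hsum]
    rw [List.range_succ (n := m + 1), List.map_append]
    simp

theorem pv_prefixA (lst : List Int) :
    (PySem.List.pyRange 0 (lst.length : Int) 1).foldl
      (fun ps i => ps.set (i + 1).toNat (PySem.List.pyGetD ps i 0 + PySem.List.pyGetD lst i 0))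
      (List.replicate (lst.length + 1) 0) = pvP lst := by
  rw [pv_prefixA_fill lst lst.length le_rfl]
  simp [pvP]

-- B's running-total loop produces the canonical prefix list
theorem pv_prefixB_gen (l : List Int) : ∀ (t : Int) (p : List Int),
    (l.foldl (fun tp x => (tp.1 + x, tp.2 ++ [tp.1 + x])) (t, p)).2
      = p ++ (List.range l.length).map (fun k => t + pvPs l (k + 1)) := by
  induction l with
  | nil => intro t p; simp
  | cons x xs ih =>
    intro t p
    simp only [List.foldl_cons, List.length_cons]
    rw [ih (t + x) (p ++ [t + x])]
    rw [List.range_succ_eq_map, List.map_cons, List.map_map]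
    have h0 : t + pvPs (x :: xs) (0 + 1) = t + x := by simp [pvPs]
    have hf : ((fun k => t + pvPs (x :: xs) (k + 1)) ∘ Nat.succ)
        = (fun k => (t + x) + pvPs xs (k + 1)) := by
      funext k
      simp only [Function.comp]
      have : pvPs (x :: xs) (k + 1 + 1) = x + pvPs xs (k + 1) := by
        simp [pvPs, List.take_succ_cons]
      rw [Nat.succ_eq_add_one, this]; ring
    rw [h0, hf]
    simp

theorem pv_prefixB (lst : List Int) :
    (lst.foldl (fun tp x => (tp.1 + x, tp.2 ++ [tp.1 + x])) ((0 : Int), [(0 : Int)])).2 = pvP lst := by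
  rw [pv_prefixB_gen lst 0 [0]]
  rw [pvP, List.range_succ_eq_map, List.map_cons, List.map_map]
  have h0 : pvPs lst 0 = 0 := by simp [pvPs]
  have hf : ((fun k => pvPs lst k) ∘ Nat.succ) = (fun k => (0 : Int) + pvPs lst (k + 1)) := by
    funext k; simp [Nat.succ_eq_add_one]
  rw [h0, hf]
  simp

-- port A computes pvSearchA rendered
theorem pv_portA (lst : List Int) :
    shortest_primed_subsequence lst = (pvSearchA lst).map (pvRender lst) := by
  have hR : (pvSearchA lst).map (pvRender lst)
      = (PySem.List.pyRange 2 ((lst.length : Int) + 1) 1).findSome?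
          (fun l => (PySem.List.pyRange 0 ((lst.length : Int) - l + 1) 1).findSome?
            (fun s => if pvQe lst s (s + l) then some (pvRender lst (l, s)) else none)) := by
    rw [pvSearchA, ← pv_findSome?_guard_map, pvPairs, pv_findSome?_flatMap]
    apply pv_findSome?_congr
    intro l _
    rw [List.findSome?_map]
    rfl
  rw [hR]
  simp only [shortest_primed_subsequence, Int.toNat_natCast, pv_prefixA]
  apply pv_findSome?_congr
  intro l hl
  apply pv_findSome?_congr
  intro s hs
  rw [PySem.List.mem_pyRange_one] at hl hs
  rw [pvP_getD lst (s + l) (by omega) (by omega), pvP_getD lst s (by omega) (by omega)]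
  rfl

-- port B computes pvBestB rendered
theorem pv_portB (lst : List Int) :
    shortest_primed_subsequence_alt lst = (pvBestB lst).map (pvRender lst) := by
  simp only [shortest_primed_subsequence_alt, pv_prefixB]
  have hfold :
      (PySem.List.pyRange 0 ((lst.length : Int)) 1).foldl
        (fun best start =>
          match (PySem.List.pyRange (start + 2) ((lst.length : Int) + 1) 1).find?
                  (fun e => is_prime (PySem.List.pyGetD (pvP lst) e 0 - PySem.List.pyGetD (pvP lst) start 0)) with
          | none => best
          | some e =>
            match best with
            | none => some (e - start, start)
            | some b =>
              if e - start < b.1 || (e - start == b.1 && start < b.2) then some (e - start, start)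
              else best)
        none = pvBestB lst := by
    rw [pvBestB]
    apply PySem.List.foldl_congr_mem
    intro acc start hstart
    rw [PySem.List.mem_pyRange_one] at hstart
    have hp : (PySem.List.pyRange (start + 2) ((lst.length : Int) + 1) 1).find?
          (fun e => is_prime (PySem.List.pyGetD (pvP lst) e 0 - PySem.List.pyGetD (pvP lst) start 0))
        = (PySem.List.pyRange (start + 2) ((lst.length : Int) + 1) 1).find? (fun e => pvQe lst start e) := by
      apply pv_find?_congr
      intro e he
      rw [PySem.List.mem_pyRange_one] at he
      rw [pvP_getD lst e (by omega) (by omega), pvP_getD lst start (by omega) (by omega)]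
      rfl
    rw [hp]
    rfl
  rw [hfold]
  cases pvBestB lst with
  | none => rfl
  | some c => cases c; rfl

theorem pv_mem_pairs (lst : List Int) (c : Int × Int) :
    c ∈ pvPairs lst ↔ 2 ≤ c.1 ∧ 0 ≤ c.2 ∧ c.2 + c.1 ≤ (lst.length : Int) := by
  obtain ⟨l, s⟩ := c
  simp only [pvPairs, List.mem_flatMap, List.mem_map, PySem.List.mem_pyRange_one]
  constructor
  · rintro ⟨a, ⟨ha1, ha2⟩, b, ⟨hb1, hb2⟩, hab⟩
    obtain ⟨rfl, rfl⟩ := Prod.mk.injEq .. ▸ hab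
    exact ⟨by omega, by omega, by omega⟩
  · rintro ⟨h1, h2, h3⟩
    exact ⟨l, ⟨by omega, by omega⟩, s, ⟨by omega, by omega⟩, rfl⟩

theorem pv_good_iff (lst : List Int) (c : Int × Int) :
    pvGood lst c ↔ c ∈ pvPairs lst ∧ pvQe lst c.2 (c.2 + c.1) = true := by
  rw [pv_mem_pairs, pvGood]
  tauto

theorem pv_pairwise_pairs (lst : List Int) : (pvPairs lst).Pairwise pvLt := by
  rw [pvPairs, List.pairwise_flatMap]
  constructor
  · intro a _
    rw [List.pairwise_map]
    exact (PySem.List.pairwise_lt_pyRange_one 0 _).imp (fun h => Or.inr ⟨rfl, h⟩)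
  · exact (PySem.List.pairwise_lt_pyRange_one 2 _).imp (by
      intro a b hab x hx y hy
      rw [List.mem_map] at hx hy
      obtain ⟨s, _, rfl⟩ := hx
      obtain ⟨s', _, rfl⟩ := hy
      exact Or.inl hab)

theorem pv_searchA_none (lst : List Int) (h : pvSearchA lst = none) :
    ∀ c, ¬pvGood lst c := by
  intro c hc
  rw [pvSearchA, List.find?_eq_none] at h
  rw [pv_good_iff] at hc
  exact h c hc.1 hc.2

theorem pv_searchA_some (lst : List Int) (c : Int × Int) (h : pvSearchA lst = some c) :
    pvGood lst c ∧ ∀ c', pvGood lst c' → pvLe c c' := by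
  have hmem := List.mem_of_find?_eq_some h
  have hq := List.find?_some h
  refine ⟨(pv_good_iff lst c).mpr ⟨hmem, hq⟩, ?_⟩
  intro c' hc'
  rw [pv_good_iff] at hc'
  rcases pv_find?_min (pv_pairwise_pairs lst) h c' hc'.1 hc'.2 with rfl | hlt
  · rw [pvLe]; omega
  · rw [pvLt] at hlt; rw [pvLe]
    rcases hlt with h1 | ⟨h1, h2⟩
    · exact Or.inl h1
    · exact Or.inr ⟨h1, le_of_lt h2⟩

-- the sweep invariant: after processing starts 0..k-1, the accumulator is exactly the
-- lexicographically least good candidate with start < k (none if there is none)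
theorem pv_inv (lst : List Int) : ∀ k : Nat,
    (∀ c, (PySem.List.pyRange 0 (k : Int) 1).foldl (pvStep lst) none = some c →
        pvGood lst c ∧ c.2 < (k : Int)) ∧
    (∀ c, pvGood lst c → c.2 < (k : Int) →
        ∃ b, (PySem.List.pyRange 0 (k : Int) 1).foldl (pvStep lst) none = some b ∧ pvLe b c) := by
  intro k
  induction k with
  | zero =>
    constructor
    · intro c h
      rw [Nat.cast_zero, PySem.List.pyRange_one_eq_nil le_rfl] at h
      simp at h
    · intro c hg hlt
      obtain ⟨_, h2, _, _⟩ := hg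
      rw [Nat.cast_zero] at hlt
      omega
  | succ k ih =>
    obtain ⟨ih1, ih2⟩ := ih
    have hsplit : PySem.List.pyRange 0 ((k + 1 : Nat) : Int) 1
        = PySem.List.pyRange 0 (k : Int) 1 ++ [(k : Int)] := by
      have hc : ((k + 1 : Nat) : Int) = (k : Int) + 1 := by push_cast; ring
      rw [hc, PySem.List.pyRange_one_succ_right (by positivity)]
    rw [hsplit]
    simp only [List.foldl_append, List.foldl_cons, List.foldl_nil]
    have hcast : ((k + 1 : Nat) : Int) = (k : Int) + 1 := by push_cast; ring
    rw [hcast]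
    -- the member e of the inner range attached to a good candidate starting at k
    have hcm : ∀ c : Int × Int, pvGood lst c → c.2 = (k : Int) →
        (c.2 + c.1) ∈ PySem.List.pyRange ((k : Int) + 2) ((lst.length : Int) + 1) 1 ∧
        pvQe lst (k : Int) (c.2 + c.1) = true := by
      intro c hg hc2
      obtain ⟨h1, h2, h3, h4⟩ := hg
      constructor
      · rw [PySem.List.mem_pyRange_one]; omega
      · rw [← hc2]; exact h4
    cases hfind : (PySem.List.pyRange ((k : Int) + 2) ((lst.length : Int) + 1) 1).find?
        (fun e => pvQe lst (k : Int) e) with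
    | none =>
      simp only [pvStep, hfind]
      constructor
      · intro c h
        obtain ⟨hg, hlt⟩ := ih1 c h
        exact ⟨hg, by omega⟩
      · intro c hg hlt
        by_cases hc2 : c.2 < (k : Int)
        · exact ih2 c hg hc2
        · have hc2' : c.2 = (k : Int) := by obtain ⟨_, h2, _, _⟩ := hg; omega
          obtain ⟨hm, hq⟩ := hcm c hg hc2'
          exact absurd hq (List.find?_eq_none.mp hfind _ hm)
    | some e =>
      have hememq := List.mem_of_find?_eq_some hfind
      have heq := List.find?_some hfind
      rw [PySem.List.mem_pyRange_one] at hememq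
      have hmin : ∀ e', e' ∈ PySem.List.pyRange ((k : Int) + 2) ((lst.length : Int) + 1) 1 →
          pvQe lst (k : Int) e' = true → e ≤ e' := by
        intro e' hm hq
        rcases pv_find?_min (PySem.List.pairwise_lt_pyRange_one _ _) hfind e' hm hq with rfl | hlt
        · exact le_rfl
        · exact le_of_lt hlt
      have hgcand : pvGood lst (e - (k : Int), (k : Int)) := by
        refine ⟨by omega, by positivity, by simp; omega, ?_⟩
        have h5 : (k : Int) + (e - (k : Int)) = e := by ring
        show pvQe lst (k : Int) ((k : Int) + (e - (k : Int))) = true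
        rw [h5]; exact heq
      have hmink : ∀ c : Int × Int, pvGood lst c → c.2 = (k : Int) →
          pvLe (e - (k : Int), (k : Int)) c := by
        intro c hg hc2
        obtain ⟨hm, hq⟩ := hcm c hg hc2
        have := hmin _ hm hq
        rw [pvLe]
        simp only []
        omega
      cases ho : (PySem.List.pyRange 0 (k : Int) 1).foldl (pvStep lst) none with
      | none =>
        simp only [pvStep, hfind, ho]
        constructor
        · intro c h
          obtain rfl : (e - (k : Int), (k : Int)) = c := by simpa using h
          exact ⟨hgcand, by simp⟩
        · intro c hg hlt
          by_cases hc2 : c.2 < (k : Int)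
          · obtain ⟨b, hb, _⟩ := ih2 c hg hc2
            rw [ho] at hb
            simp at hb
          · have hc2' : c.2 = (k : Int) := by obtain ⟨_, h2, _, _⟩ := hg; omega
            exact ⟨_, rfl, hmink c hg hc2'⟩
      | some b =>
        obtain ⟨hgb, hbk⟩ := ih1 b ho
        simp only [pvStep, hfind, ho]
        by_cases hcond : e - (k : Int) < b.1 ∨ (e - (k : Int) = b.1 ∧ (k : Int) < b.2)
        · rw [if_pos (by simp only [Bool.or_eq_true, Bool.and_eq_true, decide_eq_true_eq, beq_iff_eq]; exact hcond)]
          constructor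
          · intro c h
            obtain rfl : (e - (k : Int), (k : Int)) = c := by simpa using h
            exact ⟨hgcand, by simp⟩
          · intro c hg hlt
            refine ⟨_, rfl, ?_⟩
            by_cases hc2 : c.2 < (k : Int)
            · obtain ⟨b', hb', hle⟩ := ih2 c hg hc2
              rw [ho] at hb'
              obtain rfl : b = b' := by simpa using hb'
              rw [pvLe] at hle ⊢
              omega
            · have hc2' : c.2 = (k : Int) := by obtain ⟨_, h2, _, _⟩ := hg; omega
              exact hmink c hg hc2'
        · rw [if_neg (by simp only [Bool.or_eq_true, Bool.and_eq_true, decide_eq_true_eq, beq_iff_eq]; exact hcond)]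
          constructor
          · intro c h
            obtain rfl : b = c := by simpa using h
            exact ⟨hgb, by omega⟩
          · intro c hg hlt
            refine ⟨b, rfl, ?_⟩
            by_cases hc2 : c.2 < (k : Int)
            · obtain ⟨b', hb', hle⟩ := ih2 c hg hc2
              rw [ho] at hb'
              obtain rfl : b = b' := by simpa using hb'
              exact hle
            · have hc2' : c.2 = (k : Int) := by obtain ⟨_, h2, _, _⟩ := hg; omega
              have h1 := hmink c hg hc2'
              rw [pvLe] at h1 ⊢
              simp only [] at h1 ⊢
              omega

-- both searches are the lexicographic minimum of the good candidates, hence equal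
theorem pv_main (lst : List Int) : pvSearchA lst = pvBestB lst := by
  obtain ⟨inv1, inv2⟩ := pv_inv lst lst.length
  have hbb : pvBestB lst = (PySem.List.pyRange 0 ((lst.length : Nat) : Int) 1).foldl (pvStep lst) none := rfl
  cases hA : pvSearchA lst with
  | none =>
    cases hB : pvBestB lst with
    | none => rfl
    | some b =>
      obtain ⟨hgb, _⟩ := inv1 b (by rw [← hbb]; exact hB)
      exact absurd hgb (pv_searchA_none lst hA b)
  | some c =>
    obtain ⟨hgc, hminc⟩ := pv_searchA_some lst c hA
    have hc2 : c.2 < ((lst.length : Nat) : Int) := by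
      obtain ⟨h1, h2, h3, _⟩ := hgc; omega
    obtain ⟨b, hb, hle⟩ := inv2 c hgc hc2
    rw [← hbb] at hb
    obtain ⟨hgb, _⟩ := inv1 b (by rw [← hbb]; exact hb)
    have h2 := hminc b hgb
    rw [hb]
    have hcb : c = b := by
      obtain ⟨c1, c2⟩ := c
      obtain ⟨b1, b2⟩ := b
      rw [pvLe] at hle h2
      simp only [] at hle h2
      have : c1 = b1 ∧ c2 = b2 := by omega
      simp [this.1, this.2]
    rw [hcb]

-- ===== VERDICT (by name: the statement is the Claim_ definition above) =====
theorem shortest_primed_subsequence_spec : Claim_equal_shortest_primed_subsequence := by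
  intro lst _
  show shortest_primed_subsequence lst = shortest_primed_subsequence_alt lst
  rw [pv_portA, pv_portB, pv_main]
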